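-- pv_equiv track=rewrite | github.com/nk22ai/DAA-AAT---1BM22AI085 | cloudydayfinal.py | maximumPeople
-- ===== SOURCE A (Python) =====
-- def maximumPeople(p, x, y, r):
--     n = len(p)
--     m = len(y)
--     towns = sorted(zip(x, p))
--     clouds = sorted(zip(y, r))
--     from collections import defaultdict
--     events = []
--     for i in range(m):
--         start = y[i] - r[i]
--         end = y[i] + r[i]
--         events.append((start, 'start', i))
--         events.append((end + 1, 'end', i))
--     for i in range(n):
--         events.append((x[i], 'town', p[i]))
--     events.sort()
--     current_clouds = set()
--     sunny_population = 0
--     cloud_population = defaultdict(int)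
--     single_cloud_population = defaultdict(int)
--
--     for pos, type_, value in events:
--         if type_ == 'start':
--             current_clouds.add(value)
--         elif type_ == 'end':
--             current_clouds.remove(value)
--         elif type_ == 'town':
--             if len(current_clouds) == 0:
--                 sunny_population += value
--             elif len(current_clouds) == 1:
--                 cloud_id = next(iter(current_clouds))
--                 cloud_population[cloud_id] += value
--
--     max_population = sunny_population
--     for cloud_id in cloud_population:
--         max_population = max(max_population, sunny_population + cloud_population[cloud_id])
--     return max_population
-- ===== SOURCE B (Python) =====
-- def maximumPeople(p, x, y, r):
--     # Direct O(n*m) count per town instead of A's event sweep.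
--     from collections import defaultdict
--     sunny = 0
--     gain = defaultdict(int)
--     for xi, pi in zip(x, p):
--         cnt = 0
--         cover = None
--         for j in range(len(y)):
--             if y[j] - r[j] <= xi <= y[j] + r[j]:
--                 cnt += 1
--                 cover = j
--         if cnt == 0:
--             sunny += pi
--         elif cnt == 1:
--             gain[cover] += pi
--     best = max(gain.values(), default=0)
--     return sunny + max(best, 0)
-- ===== Notes on version B (the rewrite author's own statement) =====
-- stated objective: simpler
-- what changed: Replaces A's build-sort-and-sweep over tagged start/end/town events (with an active-cloud set) by a direct doubly-nested loop that counts, for each town, the clouds covering it, accumulating the sunny population and per-cloud removal gains in a defaultdict.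
import Mathlib
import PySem

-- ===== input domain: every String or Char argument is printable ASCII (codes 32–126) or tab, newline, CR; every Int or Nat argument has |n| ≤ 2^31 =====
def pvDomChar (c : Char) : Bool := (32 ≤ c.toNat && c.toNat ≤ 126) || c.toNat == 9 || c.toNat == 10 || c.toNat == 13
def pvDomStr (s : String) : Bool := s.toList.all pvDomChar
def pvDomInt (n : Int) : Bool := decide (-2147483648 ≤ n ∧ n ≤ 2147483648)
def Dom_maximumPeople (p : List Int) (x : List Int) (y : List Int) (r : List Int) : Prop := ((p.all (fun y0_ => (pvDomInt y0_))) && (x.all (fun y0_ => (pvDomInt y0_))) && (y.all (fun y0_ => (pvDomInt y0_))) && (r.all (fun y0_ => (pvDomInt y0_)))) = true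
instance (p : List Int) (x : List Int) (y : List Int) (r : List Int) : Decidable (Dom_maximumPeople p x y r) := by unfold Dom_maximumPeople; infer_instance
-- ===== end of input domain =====

-- B replaces A's sorted event-sweep by a direct per-town count of covering clouds (simpler, no sort);
-- equivalence of the RETURN value is proved on Pre_ (index-valid lengths, non-negative radii).

-- ===== PORT A =====
def maximumPeople (p : List Int) (x : List Int) (y : List Int) (r : List Int) : Int :=
  let n : Int := (p.length : Int)
  let m : Int := (y.length : Int)
  -- Python also builds `towns = sorted(zip(x, p))` and `clouds = sorted(zip(y, r))`; both locals
  -- are never used afterwards, so these two dead assignments are not ported.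
  let events0 : List (Int × String × Int) :=
    (PySem.List.pyRange 0 m 1).foldl (fun ev i =>
      (ev ++ [(PySem.List.pyGetD y i 0 - PySem.List.pyGetD r i 0, "start", i)])
        ++ [(PySem.List.pyGetD y i 0 + PySem.List.pyGetD r i 0 + 1, "end", i)]) []
  let events1 : List (Int × String × Int) :=
    (PySem.List.pyRange 0 n 1).foldl (fun ev i =>
      ev ++ [(PySem.List.pyGetD x i 0, "town", PySem.List.pyGetD p i 0)]) events0
  -- events.sort(): Python compares the (pos, tag, value) triples lexicographically; the value
  -- tie-break only reorders events with equal (pos, tag) — same-kind actions whose mutual order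
  -- cannot change anything the fold observes — so the stable (pos, tag) sort is exact here.
  let events := PySem.List.sorted2 events1 (fun e => e.1) (fun e => e.2.1)
  let final := events.foldl (fun (st : PySem.Set Int × Int × PySem.Dict Int Int) e =>
      if e.2.1 == "start" then (st.1.add e.2.2, st.2.1, st.2.2)
      -- none = KeyError (reachable only for a negative radius), excluded by Pre_
      else if e.2.1 == "end" then ((st.1.remove? e.2.2).getD st.1, st.2.1, st.2.2)
      else if e.2.1 == "town" then
        (if PySem.Set.len st.1 == 0 then (st.1, st.2.1 + e.2.2, st.2.2)
         else if PySem.Set.len st.1 == 1 then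
           -- next(iter(current_clouds)) on a set checked to be a singleton: its unique element
           (st.1, st.2.1, st.2.2.insert st.1.headI (st.2.2.getD st.1.headI 0 + e.2.2))
         else st)
      else st) (PySem.Set.empty, 0, PySem.Dict.empty)
  final.2.2.keys.foldl (fun mp cid => max mp (final.2.1 + final.2.2.getD cid 0)) final.2.1

-- ===== PORT B =====
def maximumPeople_alt (p : List Int) (x : List Int) (y : List Int) (r : List Int) : Int :=
  let m : Int := (y.length : Int)
  let st := (x.zip p).foldl (fun (st : Int × PySem.Dict Int Int) t =>
      let cc := (PySem.List.pyRange 0 m 1).foldl (fun (cc : Int × Option Int) j =>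
          if PySem.List.pyGetD y j 0 - PySem.List.pyGetD r j 0 ≤ t.1 ∧
             t.1 ≤ PySem.List.pyGetD y j 0 + PySem.List.pyGetD r j 0
          then (cc.1 + 1, some j) else cc) (0, none)
      if cc.1 == 0 then (st.1 + t.2, st.2)
      else if cc.1 == 1 then
        (st.1, st.2.insert ((cc.2).getD 0) (st.2.getD ((cc.2).getD 0) 0 + t.2))
      else st) (0, PySem.Dict.empty)
  st.1 + max (PySem.List.maxD st.2.values (fun v => v) 0) 0

-- ===== PRECONDITION & SPEC =====
-- Pre_ excludes exactly the inputs where the Python A raises: IndexError when x is shorter than p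
-- or r shorter than y, and KeyError when some used radius is negative (the cloud's 'end' event
-- then sorts before its 'start' event and set.remove fails).
def Pre_maximumPeople (p : List Int) (x : List Int) (y : List Int) (r : List Int) : Prop :=
  p.length ≤ x.length ∧ y.length ≤ r.length ∧ ∀ v ∈ r.take y.length, 0 ≤ v
instance (p : List Int) (x : List Int) (y : List Int) (r : List Int) : Decidable (Pre_maximumPeople p x y r) := by unfold Pre_maximumPeople; infer_instance
def pvWitness_maximumPeople : List Int × List Int × List Int × List Int := ([3, 5], [0, 6], [5], [1])

def Spec_maximumPeople (p : List Int) (x : List Int) (y : List Int) (r : List Int) (out : Int) : Prop := out = maximumPeople_alt p x y r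
instance (p : List Int) (x : List Int) (y : List Int) (r : List Int) (out : Int) : Decidable (Spec_maximumPeople p x y r out) := by unfold Spec_maximumPeople; infer_instance

-- ===== CLAIM (what is proved, stated in full; the proofs are below) =====
def Claim_equal_maximumPeople : Prop := ∀ (p : List Int) (x : List Int) (y : List Int) (r : List Int), Dom_maximumPeople p x y r → Pre_maximumPeople p x y r → Spec_maximumPeople p x y r (maximumPeople p x y r)
-- ===== LEMMAS AND PROOFS =====

-- Proof-side abbreviations (used only by the proofs below).

def sIdx (y r : List Int) (j : Int) : Int := PySem.List.pyGetD y j 0 - PySem.List.pyGetD r j 0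
def eIdx (y r : List Int) (j : Int) : Int := PySem.List.pyGetD y j 0 + PySem.List.pyGetD r j 0

/-- The clouds (by index) covering position `xi`. -/
def covL (y r : List Int) (m : Int) (xi : Int) : List Int :=
  (PySem.List.pyRange 0 m 1).filter (fun j => decide (sIdx y r j ≤ xi) && decide (xi ≤ eIdx y r j))

/-- The per-town action shared (after reduction) by both ports. -/
def townStep (y r : List Int) (m : Int) (st : Int × PySem.Dict Int Int) (t : Int × Int) :
    Int × PySem.Dict Int Int :=
  let cl := covL y r m t.1
  if cl.length = 0 then (st.1 + t.2, st.2)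
  else if cl.length = 1 then (st.1, st.2.insert cl.headI (st.2.getD cl.headI 0 + t.2))
  else st

lemma cfold_fst (l : List Int) : ∀ (c : Int) (o : Option Int),
    (l.foldl (fun (cc : Int × Option Int) j => (cc.1 + 1, some j)) (c, o)).1 = c + l.length := by
  induction l with
  | nil => intro c o; simp
  | cons a t ih => intro c o; simp [List.foldl_cons, ih]; omega

/-- Port B is the `townStep` fold followed by the final max. -/
lemma alt_eq_townFold (p x y r : List Int) :
    maximumPeople_alt p x y r =
      (fun st : Int × PySem.Dict Int Int =>
        st.1 + max (PySem.List.maxD st.2.values (fun v => v) 0) 0)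
      ((x.zip p).foldl (townStep y r (y.length : Int)) (0, PySem.Dict.empty)) := by
  have hstep : ∀ (st : Int × PySem.Dict Int Int) (t : Int × Int),
      (let cc := (PySem.List.pyRange 0 ((y.length : Int)) 1).foldl (fun (cc : Int × Option Int) j =>
            if PySem.List.pyGetD y j 0 - PySem.List.pyGetD r j 0 ≤ t.1 ∧
               t.1 ≤ PySem.List.pyGetD y j 0 + PySem.List.pyGetD r j 0
            then (cc.1 + 1, some j) else cc) ((0 : Int), (none : Option Int))
       if cc.1 == 0 then (st.1 + t.2, st.2)
       else if cc.1 == 1 then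
         (st.1, st.2.insert ((cc.2).getD 0) (st.2.getD ((cc.2).getD 0) 0 + t.2))
       else st) = townStep y r (y.length : Int) st t := by
    intro st t
    rw [PySem.List.foldl_ite_eq_foldl_filter]
    have hfe : (PySem.List.pyRange 0 ((y.length : Int)) 1).filter
        (fun j => decide (PySem.List.pyGetD y j 0 - PySem.List.pyGetD r j 0 ≤ t.1 ∧
               t.1 ≤ PySem.List.pyGetD y j 0 + PySem.List.pyGetD r j 0)) = covL y r (y.length : Int) t.1 := by
      unfold covL sIdx eIdx; simp
    rw [hfe]
    rcases hcl : covL y r ((y.length : Int)) t.1 with _ | ⟨a, tl⟩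
    · simp [townStep, hcl]
    · rcases tl with _ | ⟨b, tl2⟩
      · have hfold : (([a] : List Int).foldl (fun (cc : Int × Option Int) j => (cc.1 + 1, some j))
            ((0 : Int), (none : Option Int))) = (1, some a) := rfl
        rw [hfold]
        simp [townStep, hcl]
      · have h2 : (tl2.foldl (fun (cc : Int × Option Int) j => (cc.1 + 1, some j))
            ((2 : Int), some b)).1 = (2 : Int) + tl2.length := cfold_fst tl2 2 (some b)
        have hz2 : ¬((2 : Int) + (tl2.length : Int) = 0) := by omega
        have ho2 : ¬((2 : Int) + (tl2.length : Int) = 1) := by omega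
        simp [List.foldl_cons, h2, hz2, ho2, townStep, hcl]
  simp only [maximumPeople_alt]
  rw [List.foldl_ext _ (townStep y r ((y.length : Int))) _ (fun st t _ => hstep st t)]

-- Characterizations of the `townStep` fold (sunny total, per-cloud totals, key set).

lemma tf_fst (y r : List Int) (m : Int) : ∀ (ts : List (Int × Int)) (s0 : Int) (d0 : PySem.Dict Int Int),
    (ts.foldl (townStep y r m) (s0, d0)).1
      = s0 + ((ts.filter (fun t => decide (covL y r m t.1 = []))).map Prod.snd).sum := by
  intro ts
  induction ts with
  | nil => intro s0 d0; simp
  | cons t ts ih =>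
    intro s0 d0
    rcases hcl : covL y r m t.1 with _ | ⟨a, tl⟩
    · simp [List.foldl_cons, townStep, hcl, ih]; omega
    · rcases tl with _ | ⟨b, tl2⟩ <;> simp [List.foldl_cons, townStep, hcl, ih]

lemma tf_getD (y r : List Int) (m : Int) (c : Int) :
    ∀ (ts : List (Int × Int)) (s0 : Int) (d0 : PySem.Dict Int Int),
    (ts.foldl (townStep y r m) (s0, d0)).2.getD c 0
      = d0.getD c 0 + ((ts.filter (fun t => decide (covL y r m t.1 = [c]))).map Prod.snd).sum := by
  intro ts
  induction ts with
  | nil => intro s0 d0; simp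
  | cons t ts ih =>
    intro s0 d0
    rcases hcl : covL y r m t.1 with _ | ⟨a, tl⟩
    · simp [List.foldl_cons, townStep, hcl, ih]
    · rcases tl with _ | ⟨b, tl2⟩
      · by_cases hac : a = c
        · subst hac
          simp [List.foldl_cons, townStep, hcl, ih]
          omega
        · simp [List.foldl_cons, townStep, hcl, ih, hac]
          rw [PySem.Dict.getD_insert]
          rw [if_neg (fun h : c = a => absurd h.symm hac)]
      · simp [List.foldl_cons, townStep, hcl, ih]

lemma tf_keys (y r : List Int) (m : Int) (c : Int) :
    ∀ (ts : List (Int × Int)) (s0 : Int) (d0 : PySem.Dict Int Int),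
    (c ∈ (ts.foldl (townStep y r m) (s0, d0)).2.keys
      ↔ c ∈ d0.keys ∨ ∃ t ∈ ts, covL y r m t.1 = [c]) := by
  intro ts
  induction ts with
  | nil => intro s0 d0; simp
  | cons t ts ih =>
    intro s0 d0
    rcases hcl : covL y r m t.1 with _ | ⟨a, tl⟩
    · simp [List.foldl_cons, townStep, hcl, ih]
    · rcases tl with _ | ⟨b, tl2⟩
      · rw [List.foldl_cons]
        simp only [townStep, hcl]
        simp only [List.length_cons, List.length_nil]
        rw [if_neg (by simp), if_pos (by trivial)]
        rw [ih]
        simp [PySem.Dict.mem_keys_insert, hcl]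
        tauto
      · simp [List.foldl_cons, townStep, hcl, ih]

lemma tf_nodup_keys (y r : List Int) (m : Int) :
    ∀ (ts : List (Int × Int)) (s0 : Int) (d0 : PySem.Dict Int Int), d0.keys.Nodup →
    (ts.foldl (townStep y r m) (s0, d0)).2.keys.Nodup := by
  intro ts
  induction ts with
  | nil => intro s0 d0 h; simpa using h
  | cons t ts ih =>
    intro s0 d0 h
    rcases hcl : covL y r m t.1 with _ | ⟨a, tl⟩
    · simp only [List.foldl_cons, townStep, hcl]
      exact ih _ _ (by simpa using h)
    · rcases tl with _ | ⟨b, tl2⟩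
      · simp only [List.foldl_cons, townStep, hcl, List.length_cons, List.length_nil]
        rw [if_neg (by simp), if_pos (by trivial)]
        exact ih _ _ (PySem.Dict.nodup_keys_insert _ _ _ h)
      · simp only [List.foldl_cons, townStep, hcl, List.length_cons]
        rw [if_neg (by simp), if_neg (by simp)]
        exact ih _ _ h

-- Folded maxima over Int.

lemma foldl_max_shift (G : Int → Int) (s : Int) : ∀ (K : List Int) (a : Int),
    K.foldl (fun mp c => max mp (s + G c)) (s + a) = s + K.foldl (fun mp c => max mp (G c)) a := by
  intro K
  induction K with
  | nil => intro a; simp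
  | cons k K ih => intro a; rw [List.foldl_cons, List.foldl_cons, max_add_add_left, ih]

lemma foldl_max_reach (G : Int → Int) : ∀ (K : List Int) (a : Int),
    K.foldl (fun mp c => max mp (G c)) a = a ∨ ∃ c ∈ K, K.foldl (fun mp c => max mp (G c)) a = G c := by
  intro K
  induction K with
  | nil => intro a; exact Or.inl rfl
  | cons k K ih =>
    intro a
    rw [List.foldl_cons]
    rcases ih (max a (G k)) with he | ⟨c, hc, he⟩
    · rw [he]
      rcases max_choice a (G k) with h | h
      · exact Or.inl h
      · exact Or.inr ⟨k, List.mem_cons_self, h⟩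
    · exact Or.inr ⟨c, List.mem_cons_of_mem _ hc, he⟩

lemma foldl_max_eq_of_mem_iff (G : Int → Int) (K1 K2 : List Int) (h : ∀ c, c ∈ K1 ↔ c ∈ K2) (a : Int) :
    K1.foldl (fun mp c => max mp (G c)) a = K2.foldl (fun mp c => max mp (G c)) a := by
  apply le_antisymm
  · rcases foldl_max_reach G K1 a with he | ⟨c, hc, he⟩
    · rw [he]; exact (PySem.List.le_foldl_max_int K2 G a).1
    · rw [he]; exact (PySem.List.le_foldl_max_int K2 G a).2 c ((h c).mp hc)
  · rcases foldl_max_reach G K2 a with he | ⟨c, hc, he⟩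
    · rw [he]; exact (PySem.List.le_foldl_max_int K1 G a).1
    · rw [he]; exact (PySem.List.le_foldl_max_int K1 G a).2 c ((h c).mpr hc)

lemma foldl_max_swap : ∀ (t : List Int) (a b : Int), t.foldl max (max a b) = max a (t.foldl max b) := by
  intro t
  induction t with
  | nil => intro a b; rfl
  | cons c t ih => intro a b; rw [List.foldl_cons, List.foldl_cons, max_assoc, ih]

lemma max_maxD_eq_foldl (V : List Int) :
    max (PySem.List.maxD V (fun v => v) 0) 0 = V.foldl max 0 := by
  cases V with
  | nil => simp [PySem.List.maxD_nil]
  | cons v t =>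
    rw [PySem.List.maxD_id_cons, List.foldl_cons, max_comm, foldl_max_swap]

-- ===== A-side: events, sortedness, and the sweep invariant =====

def cloudEvs (y r : List Int) (m : Int) : List (Int × String × Int) :=
  (PySem.List.pyRange 0 m 1).flatMap (fun i => [(sIdx y r i, "start", i), (eIdx y r i + 1, "end", i)])

def townEvs (p x : List Int) (n : Int) : List (Int × String × Int) :=
  (PySem.List.pyRange 0 n 1).map (fun i => (PySem.List.pyGetD x i 0, "town", PySem.List.pyGetD p i 0))

def allEvs (p x y r : List Int) : List (Int × String × Int) :=
  cloudEvs y r (y.length : Int) ++ townEvs p x (p.length : Int)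

def evSorted (p x y r : List Int) : List (Int × String × Int) :=
  PySem.List.sorted2 (allEvs p x y r) (fun e => e.1) (fun e => e.2.1)

def stepA (st : PySem.Set Int × Int × PySem.Dict Int Int) (e : Int × String × Int) :
    PySem.Set Int × Int × PySem.Dict Int Int :=
  if e.2.1 == "start" then (st.1.add e.2.2, st.2.1, st.2.2)
  else if e.2.1 == "end" then ((st.1.remove? e.2.2).getD st.1, st.2.1, st.2.2)
  else if e.2.1 == "town" then
    (if PySem.Set.len st.1 == 0 then (st.1, st.2.1 + e.2.2, st.2.2)
     else if PySem.Set.len st.1 == 1 then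
       (st.1, st.2.1, st.2.2.insert st.1.headI (st.2.2.getD st.1.headI 0 + e.2.2))
     else st)
  else st

/-- Port A is the `stepA` fold over the sorted events plus the final key loop. -/
lemma portA_eq (p x y r : List Int) :
    maximumPeople p x y r =
      (fun fin : PySem.Set Int × Int × PySem.Dict Int Int =>
        fin.2.2.keys.foldl (fun mp cid => max mp (fin.2.1 + fin.2.2.getD cid 0)) fin.2.1)
      ((evSorted p x y r).foldl stepA (PySem.Set.empty, 0, PySem.Dict.empty)) := by
  simp only [maximumPeople]
  have h0 : (PySem.List.pyRange 0 ((y.length : Int)) 1).foldl (fun ev i =>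
      (ev ++ [(PySem.List.pyGetD y i 0 - PySem.List.pyGetD r i 0, "start", i)])
        ++ [(PySem.List.pyGetD y i 0 + PySem.List.pyGetD r i 0 + 1, "end", i)])
      ([] : List (Int × String × Int)) = cloudEvs y r (y.length : Int) := by
    have he := List.foldl_ext
      (fun (ev : List (Int × String × Int)) i =>
        (ev ++ [(PySem.List.pyGetD y i 0 - PySem.List.pyGetD r i 0, "start", i)])
          ++ [(PySem.List.pyGetD y i 0 + PySem.List.pyGetD r i 0 + 1, "end", i)])
      (fun (ev : List (Int × String × Int)) i =>
        ev ++ [(sIdx y r i, "start", i), (eIdx y r i + 1, "end", i)])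
      ([] : List (Int × String × Int))
      (l := PySem.List.pyRange 0 ((y.length : Int)) 1)
      (by intro acc b _; simp [sIdx, eIdx])
    rw [he, PySem.List.foldl_append_eq_flatMap]
    simp [cloudEvs]
  have h1 : ∀ acc : List (Int × String × Int),
      (PySem.List.pyRange 0 ((p.length : Int)) 1).foldl (fun ev i =>
        ev ++ [(PySem.List.pyGetD x i 0, "town", PySem.List.pyGetD p i 0)]) acc
      = acc ++ townEvs p x (p.length : Int) := by
    intro acc
    rw [PySem.List.foldl_append_singleton_eq_map
      (f := fun i => (PySem.List.pyGetD x i 0, "town", PySem.List.pyGetD p i 0))]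
    simp [townEvs]
  rw [h0, h1]
  rfl

def evR (a b : Int × String × Int) : Prop :=
  a.1 < b.1 ∨ (a.1 = b.1 ∧ ¬ (b.2.1.toList < a.2.1.toList))

lemma evR_pos_le {a e : Int × String × Int} (h : evR a e) : a.1 ≤ e.1 := by
  rcases h with h | ⟨h, _⟩
  · exact le_of_lt h
  · exact le_of_eq h

lemma evR_trans : ∀ a b c, evR a b → evR b c → evR a c := by
  rintro a b c (h1 | ⟨h1, h1'⟩) (h2 | ⟨h2, h2'⟩)
  · exact Or.inl (lt_trans h1 h2)
  · exact Or.inl (h2 ▸ h1)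
  · exact Or.inl (h1 ▸ h2)
  · exact Or.inr ⟨h1.trans h2, fun hlt => h1' (lt_of_le_of_lt (not_lt.mp h2') hlt)⟩

lemma pairwise_insertBy_of {α : Type} (R : α → α → Prop) (before : α → α → Bool)
    (h1 : ∀ a b, before a b = true → R a b)
    (h2 : ∀ a b, before a b = false → R b a)
    (htr : ∀ a b c, R a b → R b c → R a c) (x : α) :
    ∀ l : List α, l.Pairwise R → (PySem.List.insertBy before x l).Pairwise R := by
  intro l
  induction l with
  | nil => intro _; exact List.pairwise_singleton _ _
  | cons yh t ih =>
    intro hp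
    have hstep : PySem.List.insertBy before x (yh :: t) =
        if before x yh then x :: yh :: t else yh :: PySem.List.insertBy before x t := rfl
    rw [hstep]
    rcases List.pairwise_cons.mp hp with ⟨hy, ht⟩
    by_cases hb : before x yh = true
    · rw [if_pos hb]
      refine List.pairwise_cons.mpr ⟨?_, hp⟩
      intro z hz
      rcases List.mem_cons.mp hz with rfl | hz'
      · exact h1 _ _ hb
      · exact htr _ _ _ (h1 _ _ hb) (hy z hz')
    · rw [if_neg hb]
      refine List.pairwise_cons.mpr ⟨?_, ih ht⟩
      intro z hz
      rcases (PySem.List.mem_insertBy _ _ _ _).mp hz with rfl | hz'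
      · exact h2 _ _ (Bool.eq_false_iff.mpr hb)
      · exact hy z hz'

lemma bf_true (a b : Int × String × Int)
    (h : (decide (a.1 < b.1) || (!decide (b.1 < a.1) && decide (a.2.1 < b.2.1))) = true) : evR a b := by
  simp only [Bool.or_eq_true, Bool.and_eq_true, decide_eq_true_iff, Bool.not_eq_true',
    decide_eq_false_iff_not] at h
  rcases h with h | ⟨hnl, hlt⟩
  · exact Or.inl h
  · rw [String.lt_iff_toList_lt] at hlt
    rcases lt_or_eq_of_le (not_lt.mp hnl) with h' | h'
    · exact Or.inl h'
    · exact Or.inr ⟨h', lt_asymm hlt⟩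

lemma bf_false (a b : Int × String × Int)
    (h : (decide (a.1 < b.1) || (!decide (b.1 < a.1) && decide (a.2.1 < b.2.1))) = false) : evR b a := by
  simp only [Bool.or_eq_false_iff, Bool.and_eq_false_iff, Bool.not_eq_false',
    decide_eq_false_iff_not, decide_eq_true_iff] at h
  rcases h with ⟨hnl, h2⟩
  rcases lt_or_eq_of_le (not_lt.mp hnl) with h' | h'
  · exact Or.inl h'
  · refine Or.inr ⟨h', ?_⟩
    rcases h2 with h2 | h2
    · exact absurd (h' ▸ h2) (lt_irrefl _)
    · rw [String.lt_iff_toList_lt] at h2; exact h2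

lemma pairwise_evSorted (p x y r : List Int) : (evSorted p x y r).Pairwise evR := by
  show (List.foldl (fun acc e => PySem.List.insertBy _ e acc) [] (allEvs p x y r)).Pairwise evR
  generalize allEvs p x y r = xs
  have main : ∀ (xs : List (Int × String × Int)) (acc : List (Int × String × Int)),
      acc.Pairwise evR →
      (List.foldl (fun acc e => PySem.List.insertBy
        (fun a b => decide (a.1 < b.1) || (!decide (b.1 < a.1) && decide (a.2.1 < b.2.1))) e acc) acc xs).Pairwise evR := by
    intro xs
    induction xs with
    | nil => intro acc h; exact h
    | cons e xs ih =>
      intro acc h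
      exact ih _ (pairwise_insertBy_of evR _ bf_true bf_false evR_trans e acc h)
  exact main xs [] List.Pairwise.nil

lemma perm_evSorted (p x y r : List Int) : (evSorted p x y r).Perm (allEvs p x y r) :=
  PySem.List.sorted2_perm _ _ _ _

/-- Active clouds encoded by a processed prefix. -/
def Phi (y r : List Int) (P : List (Int × String × Int)) (v : Int) : Prop :=
  ∃ j : Int, (0 ≤ j ∧ j < (y.length : Int)) ∧ v = j ∧
    (sIdx y r j, "start", j) ∈ P ∧ (eIdx y r j + 1, "end", j) ∉ P

def townsOf (P : List (Int × String × Int)) : List (Int × Int) :=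
  P.filterMap (fun e => if e.2.1 = "town" then some (e.1, e.2.2) else none)

def InvA (y r : List Int) (P : List (Int × String × Int))
    (st : PySem.Set Int × Int × PySem.Dict Int Int) : Prop :=
  st.1.Nodup ∧ (∀ v : Int, v ∈ st.1 ↔ Phi y r P v) ∧
  st.2 = (townsOf P).foldl (townStep y r (y.length : Int)) (0, PySem.Dict.empty)

lemma covL_nodup (y r : List Int) (m : Int) (xi : Int) : (covL y r m xi).Nodup :=
  (PySem.List.nodup_pyRange_one _ _).filter _

lemma Phi_append_of_ne (y r : List Int) (P : List (Int × String × Int)) (e : Int × String × Int)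
    (hs : ∀ j : Int, (sIdx y r j, "start", j) ≠ e)
    (he : ∀ j : Int, (eIdx y r j + 1, "end", j) ≠ e) (v : Int) :
    Phi y r (P ++ [e]) v ↔ Phi y r P v := by
  unfold Phi
  constructor
  · rintro ⟨j, hj, hv, hin, hout⟩
    rcases List.mem_append.mp hin with hin' | hin'
    · exact ⟨j, hj, hv, hin', fun hP => hout (List.mem_append_left _ hP)⟩
    · exact absurd (List.mem_singleton.mp hin') (hs j)
  · rintro ⟨j, hj, hv, hin, hout⟩
    refine ⟨j, hj, hv, List.mem_append_left _ hin, ?_⟩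
    intro hP
    rcases List.mem_append.mp hP with hP' | hP'
    · exact hout hP'
    · exact absurd (List.mem_singleton.mp hP') (he j)

lemma town_prefix_char (p x y r : List Int) (P T : List (Int × String × Int))
    (e : Int × String × Int) (hL : evSorted p x y r = P ++ e :: T) (he : e.2.1 = "town") :
    ∀ j : Int, 0 ≤ j → j < (y.length : Int) →
      (((sIdx y r j, "start", j) ∈ P) ↔ sIdx y r j ≤ e.1) ∧
      (((eIdx y r j + 1, "end", j) ∈ P) ↔ eIdx y r j + 1 ≤ e.1) := by
  intro j hj0 hjm
  have hpair' : (P ++ e :: T).Pairwise evR := hL ▸ pairwise_evSorted p x y r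
  have hPe : ∀ a ∈ P, evR a e := by
    intro a ha
    exact (List.pairwise_append.mp hpair').2.2 a ha e (List.mem_cons_self)
  have heT : ∀ b ∈ T, evR e b :=
    (List.pairwise_cons.mp (List.pairwise_append.mp hpair').2.1).1
  have hjr : j ∈ PySem.List.pyRange 0 ((y.length : Int)) 1 :=
    PySem.List.mem_pyRange_one.mpr ⟨hj0, hjm⟩
  have hsmem : (sIdx y r j, "start", j) ∈ allEvs p x y r := by
    refine List.mem_append_left _ (List.mem_flatMap.mpr ⟨j, hjr, ?_⟩)
    simp
  have hemem : (eIdx y r j + 1, "end", j) ∈ allEvs p x y r := by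
    refine List.mem_append_left _ (List.mem_flatMap.mpr ⟨j, hjr, ?_⟩)
    simp
  constructor
  · constructor
    · intro hmem
      exact evR_pos_le (hPe _ hmem)
    · intro hle
      have hinL : (sIdx y r j, "start", j) ∈ P ++ e :: T := by
        rw [← hL]
        exact (perm_evSorted p x y r).mem_iff.mpr hsmem
      rcases List.mem_append.mp hinL with hin | hin
      · exact hin
      · rcases List.mem_cons.mp hin with heq | hin'
        · exfalso
          have : ("start" : String) = e.2.1 := by rw [← heq]
          rw [he] at this
          simp at this
        · exfalso
          rcases heT _ hin' with hlt | ⟨heq', hnlt⟩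
          · exact absurd hle (by simpa using not_le.mpr hlt)
          · refine hnlt ?_
            rw [he]
            exact (by decide : ("start" : String).toList < ("town" : String).toList)
  · constructor
    · intro hmem
      exact evR_pos_le (hPe _ hmem)
    · intro hle
      have hinL : (eIdx y r j + 1, "end", j) ∈ P ++ e :: T := by
        rw [← hL]
        exact (perm_evSorted p x y r).mem_iff.mpr hemem
      rcases List.mem_append.mp hinL with hin | hin
      · exact hin
      · rcases List.mem_cons.mp hin with heq | hin'
        · exfalso
          have : ("end" : String) = e.2.1 := by rw [← heq]
          rw [he] at this
          simp at this
        · exfalso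
          rcases heT _ hin' with hlt | ⟨heq', hnlt⟩
          · exact absurd hle (by simpa using not_le.mpr hlt)
          · refine hnlt ?_
            rw [he]
            exact (by decide : ("end" : String).toList < ("town" : String).toList)

lemma rad_nonneg (y r : List Int) (hr : y.length ≤ r.length)
    (hr0 : ∀ v ∈ r.take y.length, 0 ≤ v) {i : Int} (h0 : 0 ≤ i) (hm : i < (y.length : Int)) :
    0 ≤ PySem.List.pyGetD r i 0 := by
  have hlt : i.toNat < r.length := by omega
  have hlty : i.toNat < y.length := by omega
  rw [PySem.List.pyGetD_of_nonneg r 0 h0, List.getD_eq_getElem r 0 hlt]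
  have htk : (r.take y.length)[i.toNat]'(by simp; omega) = r[i.toNat] := List.getElem_take
  exact hr0 _ (htk ▸ List.getElem_mem _)

lemma sweep_step (p x y r : List Int)
    (hr : y.length ≤ r.length) (hr0 : ∀ v ∈ r.take y.length, 0 ≤ v)
    (P T : List (Int × String × Int)) (e : Int × String × Int)
    (st : PySem.Set Int × Int × PySem.Dict Int Int)
    (hL : evSorted p x y r = P ++ e :: T) (hinv : InvA y r P st) :
    InvA y r (P ++ [e]) (stepA st e) := by
  obtain ⟨hnd, hmem, htown⟩ := hinv
  have hpair' : (P ++ e :: T).Pairwise evR := hL ▸ pairwise_evSorted p x y r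
  have hPe : ∀ a ∈ P, evR a e := by
    intro a ha
    exact (List.pairwise_append.mp hpair').2.2 a ha e (List.mem_cons_self)
  have heE : e ∈ allEvs p x y r := by
    refine (perm_evSorted p x y r).mem_iff.mp ?_
    rw [hL]
    exact List.mem_append_right _ (List.mem_cons_self)
  rcases List.mem_append.mp heE with hc | ht
  · rcases List.mem_flatMap.mp hc with ⟨i, hi, hei⟩
    have hib := PySem.List.mem_pyRange_one.mp hi
    rcases List.mem_cons.mp hei with rfl | hei'
    · -- start event
      have hstep : stepA st ((sIdx y r i, "start", i)) = (st.1.add i, st.2.1, st.2.2) := by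
        simp [stepA]
      rw [hstep]
      have hnotendP : (eIdx y r i + 1, "end", i) ∉ P := by
        intro hmemP
        have hle : eIdx y r i + 1 ≤ sIdx y r i := evR_pos_le (hPe _ hmemP)
        have hri : 0 ≤ PySem.List.pyGetD r i 0 := rad_nonneg y r hr hr0 hib.1 hib.2
        unfold sIdx eIdx at hle
        omega
      refine ⟨PySem.Set.nodup_add _ _ hnd, ?_, ?_⟩
      · intro v
        rw [PySem.Set.mem_add, hmem v]
        unfold Phi
        constructor
        · rintro (⟨j, hj, hv, hsin, hnend⟩ | hvi)
          · refine ⟨j, hj, hv, List.mem_append_left _ hsin, ?_⟩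
            intro hP
            rcases List.mem_append.mp hP with hP' | hP'
            · exact hnend hP'
            · have := List.mem_singleton.mp hP'
              simp at this
          · refine ⟨i, hib, hvi, List.mem_append_right _ (List.mem_singleton.mpr rfl), ?_⟩
            intro hP
            rcases List.mem_append.mp hP with hP' | hP'
            · exact hnotendP hP'
            · have := List.mem_singleton.mp hP'
              simp at this
        · rintro ⟨j, hj, hv, hsin, hnend⟩
          rcases List.mem_append.mp hsin with hin | hin
          · exact Or.inl ⟨j, hj, hv, hin, fun hP => hnend (List.mem_append_left _ hP)⟩
          · have := List.mem_singleton.mp hin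
            have hji : j = i := by
              have := congrArg (fun q : Int × String × Int => q.2.2) this
              simpa using this
            exact Or.inr (by rw [hv, hji])
      · have : townsOf (P ++ [(sIdx y r i, "start", i)]) = townsOf P := by
          simp [townsOf, List.filterMap_append]
        rw [this]
        exact htown
    · -- end event
      have he' : e = (eIdx y r i + 1, "end", i) := by simpa using hei'
      subst he'
      have hstep : stepA st ((eIdx y r i + 1, "end", i))
          = ((st.1.remove? i).getD st.1, st.2.1, st.2.2) := by
        simp [stepA]
      rw [hstep]
      have hcur : ∀ v : Int, (v ∈ ((st.1.remove? i).getD st.1) ↔ v ∈ st.1 ∧ v ≠ i) ∧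
          ((st.1.remove? i).getD st.1).Nodup := by
        intro v
        by_cases hmi : i ∈ st.1
        · rw [PySem.Set.remove?_of_mem hmi]
          exact ⟨by simp [PySem.Set.mem_discard], PySem.Set.nodup_discard _ _ hnd⟩
        · rw [(PySem.Set.remove?_eq_none_iff _ _).mpr hmi]
          refine ⟨?_, hnd⟩
          simp only [Option.getD_none]
          constructor
          · intro hv
            exact ⟨hv, fun hvi => hmi (hvi ▸ hv)⟩
          · exact fun hv => hv.1
      refine ⟨(hcur 0).2, ?_, ?_⟩
      · intro v
        rw [(hcur v).1, hmem v]
        unfold Phi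
        constructor
        · rintro ⟨⟨j, hj, hv, hsin, hnend⟩, hvi⟩
          refine ⟨j, hj, hv, List.mem_append_left _ hsin, ?_⟩
          intro hP
          rcases List.mem_append.mp hP with hP' | hP'
          · exact hnend hP'
          · have := List.mem_singleton.mp hP'
            have hji : j = i := by
              have := congrArg (fun q : Int × String × Int => q.2.2) this
              simpa using this
            exact hvi (hv.trans hji)
        · rintro ⟨j, hj, hv, hsin, hnend⟩
          have hji : j ≠ i := by
            intro hji
            exact hnend (by rw [hji]; exact List.mem_append_right _ (List.mem_singleton.mpr rfl))
          have hsin' : (sIdx y r j, "start", j) ∈ P := by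
            rcases List.mem_append.mp hsin with hP' | hP'
            · exact hP'
            · have := List.mem_singleton.mp hP'
              simp at this
          exact ⟨⟨j, hj, hv, hsin', fun hP => hnend (List.mem_append_left _ hP)⟩, fun hvi => hji (by rw [← hv]; exact hvi)⟩
      · have : townsOf (P ++ [(eIdx y r i + 1, "end", i)]) = townsOf P := by
          simp [townsOf, List.filterMap_append]
        rw [this]
        exact htown
  · -- town event
    rcases List.mem_map.mp ht with ⟨i, hi, rfl⟩
    have hchar := town_prefix_char p x y r P T _ hL rfl
    set xi := PySem.List.pyGetD x i 0 with hxi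
    set pv := PySem.List.pyGetD p i 0 with hpv
    have hcov : ∀ v : Int, v ∈ st.1 ↔ v ∈ covL y r (y.length : Int) xi := by
      intro v
      rw [hmem v]
      unfold Phi covL
      constructor
      · rintro ⟨j, hj, hv, hsin, hnend⟩
        rw [List.mem_filter]
        refine ⟨by rw [hv]; exact PySem.List.mem_pyRange_one.mpr hj, ?_⟩
        have h1 := ((hchar j hj.1 hj.2).1).mp hsin
        have h2 : ¬ (eIdx y r j + 1 ≤ xi) := fun hle => hnend (((hchar j hj.1 hj.2).2).mpr hle)
        rw [hv]
        simp only [Bool.and_eq_true, decide_eq_true_iff]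
        exact ⟨h1, by omega⟩
      · intro hvf
        rw [List.mem_filter] at hvf
        obtain ⟨hvr, hcond⟩ := hvf
        simp only [Bool.and_eq_true, decide_eq_true_iff] at hcond
        have hb := PySem.List.mem_pyRange_one.mp hvr
        refine ⟨v, hb, rfl, ((hchar v hb.1 hb.2).1).mpr hcond.1, ?_⟩
        intro hP
        have := ((hchar v hb.1 hb.2).2).mp hP
        omega
    have hpermc : st.1.Perm (covL y r (y.length : Int) xi) :=
      (List.perm_ext_iff_of_nodup hnd (covL_nodup _ _ _ _)).mpr hcov
    have hlen : st.1.length = (covL y r (y.length : Int) xi).length := hpermc.length_eq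
    have hPhiKeep : ∀ v : Int, Phi y r (P ++ [(xi, "town", pv)]) v ↔ Phi y r P v := by
      apply Phi_append_of_ne
      · intro j h
        have := congrArg (fun q : Int × String × Int => q.2.1) h
        simp at this
      · intro j h
        have := congrArg (fun q : Int × String × Int => q.2.1) h
        simp at this
    have htowns : townsOf (P ++ [(xi, "town", pv)]) = townsOf P ++ [(xi, pv)] := by
      simp [townsOf, List.filterMap_append]
    rcases hcle : covL y r (y.length : Int) xi with _ | ⟨a, tl⟩
    · have hnil : st.1 = [] := List.length_eq_zero_iff.mp (by rw [hlen, hcle]; rfl)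
      have hstep : stepA st ((xi, "town", pv)) = (st.1, st.2.1 + pv, st.2.2) := by
        simp [stepA, PySem.Set.len, hnil]
      rw [hstep]
      refine ⟨hnd, fun v => by rw [hmem v]; exact (hPhiKeep v).symm, ?_⟩
      rw [htowns, List.foldl_concat, ← htown]
      show _ = townStep y r ((y.length : Int)) st.2 (xi, pv)
      unfold townStep
      rw [hcle]
      simp
    · rcases tl with _ | ⟨b, tl2⟩
      · have hone : st.1 = [a] := List.perm_singleton.mp (hcle ▸ hpermc)
        have hstep : stepA st ((xi, "town", pv)) =
            (st.1, st.2.1, st.2.2.insert a (st.2.2.getD a 0 + pv)) := by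
          simp [stepA, PySem.Set.len, hone]
        rw [hstep]
        refine ⟨hnd, fun v => by rw [hmem v]; exact (hPhiKeep v).symm, ?_⟩
        rw [htowns, List.foldl_concat, ← htown]
        show _ = townStep y r ((y.length : Int)) st.2 (xi, pv)
        unfold townStep
        rw [hcle]
        simp
      · have hlen2 : st.1.length = tl2.length + 2 := by rw [hlen, hcle]; rfl
        have hstep : stepA st ((xi, "town", pv)) = st := by
          simp [stepA, PySem.Set.len, hlen2]
          rw [if_neg (by omega), if_neg (by omega)]
        rw [hstep]
        refine ⟨hnd, fun v => by rw [hmem v]; exact (hPhiKeep v).symm, ?_⟩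
        rw [htowns, List.foldl_concat, ← htown]
        show st.2 = townStep y r ((y.length : Int)) st.2 (xi, pv)
        unfold townStep
        rw [hcle]
        simp

lemma sweep_final (p x y r : List Int)
    (hr : y.length ≤ r.length) (hr0 : ∀ v ∈ r.take y.length, 0 ≤ v) :
    InvA y r (evSorted p x y r)
      ((evSorted p x y r).foldl stepA (PySem.Set.empty, 0, PySem.Dict.empty)) := by
  have haux : ∀ (T P : List (Int × String × Int)) st,
      evSorted p x y r = P ++ T → InvA y r P st →
      InvA y r (P ++ T) (T.foldl stepA st) := by
    intro T
    induction T with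
    | nil => intro P st h hinv; simp only [List.append_nil] at h ⊢; exact hinv
    | cons e T ih =>
      intro P st h hinv
      have hstep := sweep_step p x y r hr hr0 P T e st h hinv
      have h' : evSorted p x y r = (P ++ [e]) ++ T := by rw [h]; simp
      have := ih (P ++ [e]) (stepA st e) h' hstep
      simpa using this
  have := haux (evSorted p x y r) [] (PySem.Set.empty, 0, PySem.Dict.empty) rfl ?_
  · simpa using this
  · refine ⟨List.nodup_nil, ?_, rfl⟩
    intro v
    unfold Phi
    simp [PySem.Set.empty]

lemma townsOf_allEvs (p x y r : List Int) :
    townsOf (allEvs p x y r) =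
      (PySem.List.pyRange 0 ((p.length : Int)) 1).map
        (fun i => (PySem.List.pyGetD x i 0, PySem.List.pyGetD p i 0)) := by
  unfold allEvs townsOf
  rw [List.filterMap_append]
  have h1 : (cloudEvs y r ((y.length : Int))).filterMap
      (fun e => if e.2.1 = "town" then some (e.1, e.2.2) else none) = [] := by
    rw [List.filterMap_eq_nil_iff]
    intro e he
    rcases List.mem_flatMap.mp he with ⟨i, _, hei⟩
    rcases List.mem_cons.mp hei with rfl | hei'
    · simp
    · rcases List.mem_cons.mp hei' with rfl | h
      · simp
      · simp at h
  rw [h1]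
  simp [townEvs, List.filterMap_map, Function.comp]

lemma pyMap_eq_zip (p x : List Int) (hx : p.length ≤ x.length) :
    (PySem.List.pyRange 0 ((p.length : Int)) 1).map
      (fun i => (PySem.List.pyGetD x i 0, PySem.List.pyGetD p i 0)) = x.zip p := by
  rw [PySem.List.pyRange_zero_natCast, List.map_map]
  apply List.ext_getElem
  · simp [List.length_zip]
    omega
  · intro i h1 h2
    have hip : i < p.length := by simpa using h1
    have hixx : i < x.length := by omega
    simp only [List.getElem_map, List.getElem_range, Function.comp]
    rw [List.getElem_zip]
    have hgx : PySem.List.pyGetD x ((i : Nat) : Int) 0 = x[i] := by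
      rw [PySem.List.pyGetD_natCast, List.getD_eq_getElem x 0 hixx]
    have hgp : PySem.List.pyGetD p ((i : Nat) : Int) 0 = p[i] := by
      rw [PySem.List.pyGetD_natCast, List.getD_eq_getElem p 0 hip]
    rw [hgx, hgp]

-- ===== VERDICT (by name: the statement is the Claim_ definition above) =====
theorem maximumPeople_spec : Claim_equal_maximumPeople := by
  intro p x y r hdom hpre
  obtain ⟨hx, hr, hr0⟩ := hpre
  show maximumPeople p x y r = maximumPeople_alt p x y r
  rw [portA_eq, alt_eq_townFold]
  obtain ⟨hnd, hmem, htown⟩ := sweep_final p x y r hr hr0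
  have hTL : (townsOf (evSorted p x y r)).Perm (x.zip p) := by
    have h1 : (townsOf (evSorted p x y r)).Perm (townsOf (allEvs p x y r)) :=
      (perm_evSorted p x y r).filterMap _
    rw [townsOf_allEvs, pyMap_eq_zip p x hx] at h1
    exact h1
  set finA := (evSorted p x y r).foldl stepA (PySem.Set.empty, 0, PySem.Dict.empty) with hfinA
  set fA := (townsOf (evSorted p x y r)).foldl (townStep y r ((y.length : Int)))
      (0, PySem.Dict.empty) with hfA
  set fB := (x.zip p).foldl (townStep y r ((y.length : Int))) (0, PySem.Dict.empty) with hfB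
  have h21 : finA.2.1 = fA.1 := by rw [htown]
  have h22 : finA.2.2 = fA.2 := by rw [htown]
  show finA.2.2.keys.foldl (fun mp cid => max mp (finA.2.1 + finA.2.2.getD cid 0)) finA.2.1
      = fB.1 + max (PySem.List.maxD fB.2.values (fun v => v) 0) 0
  rw [h21, h22]
  have hfst : fA.1 = fB.1 := by
    rw [hfA, hfB, tf_fst, tf_fst]
    congr 1
    exact ((hTL.filter _).map _).sum_eq
  have hG : ∀ c, fA.2.getD c 0 = fB.2.getD c 0 := by
    intro c
    rw [hfA, hfB, tf_getD, tf_getD]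
    congr 1
    exact ((hTL.filter _).map _).sum_eq
  have hK : ∀ c : Int, (c ∈ fA.2.keys ↔ c ∈ fB.2.keys) := by
    intro c
    rw [hfA, hfB, tf_keys, tf_keys]
    constructor
    · rintro (h | ⟨t, ht, hc⟩)
      · exact Or.inl h
      · exact Or.inr ⟨t, hTL.mem_iff.mp ht, hc⟩
    · rintro (h | ⟨t, ht, hc⟩)
      · exact Or.inl h
      · exact Or.inr ⟨t, hTL.mem_iff.mpr ht, hc⟩
  have hnodB : fB.2.keys.Nodup := by
    rw [hfB]
    exact tf_nodup_keys _ _ _ _ _ _ PySem.Dict.nodup_keys_empty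
  have hstep1 : fA.2.keys.foldl (fun mp cid => max mp (fA.1 + fA.2.getD cid 0)) fA.1
      = fA.2.keys.foldl (fun mp cid => max mp (fB.1 + fB.2.getD cid 0)) fB.1 := by
    rw [hfst]
    exact List.foldl_ext _ _ _ (fun a b _ => by rw [hG b])
  rw [hstep1]
  have hshift : fA.2.keys.foldl (fun mp cid => max mp (fB.1 + fB.2.getD cid 0)) fB.1
      = fB.1 + fA.2.keys.foldl (fun mp cid => max mp (fB.2.getD cid 0)) 0 := by
    have := foldl_max_shift (fun cid => fB.2.getD cid 0) fB.1 fA.2.keys 0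
    simpa using this
  rw [hshift, foldl_max_eq_of_mem_iff _ _ _ hK]
  congr 1
  rw [PySem.Dict.values_eq_map_keys fB.2 hnodB 0, max_maxD_eq_foldl, List.foldl_map]
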